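-- pv_equiv track=rewrite | github.com/verixlabs-chase/seo-accelerator-tool | backend/app/services/crawl_service.py | _robots_txt_allows
-- ===== SOURCE A (Python) =====
-- def _robots_txt_allows(robots_txt: str, path: str) -> bool:
--     lines = [line.strip() for line in robots_txt.splitlines()]
--     disallowed_prefixes: list[str] = []
--     in_global_agent = False
--     for line in lines:
--         if not line or line.startswith("#"):
--             continue
--         lower = line.lower()
--         if lower.startswith("user-agent:"):
--             agent = lower.split(":", 1)[1].strip()
--             in_global_agent = agent in {"*", '"*"'}
--             continue
--         if in_global_agent and lower.startswith("disallow:"):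
--             value = line.split(":", 1)[1].strip()
--             if value:
--                 disallowed_prefixes.append(value)
--     return not any(path.startswith(prefix) for prefix in disallowed_prefixes)
-- ===== SOURCE B (Python) =====
-- def _robots_txt_allows(robots_txt: str, path: str) -> bool:
--     # Stage 1: group the file into blocks, each headed by a user-agent line.
--     # Lines before the first user-agent line belong to no block and are dropped.
--     blocks: list[tuple[str, list[str]]] = []
--     current: list[str] | None = None
--     for raw in robots_txt.splitlines():
--         line = raw.strip()
--         if not line or line.startswith("#"):
--             continue
--         if line.lower().startswith("user-agent:"):
--             agent = line.lower().split(":", 1)[1].strip()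
--             current = []
--             blocks.append((agent, current))
--         elif current is not None:
--             current.append(line)
--     # Stage 2: only blocks headed by the global agent matter.
--     for agent, body in blocks:
--         if agent not in ("*", '"*"'):
--             continue
--         for line in body:
--             if line.lower().startswith("disallow:"):
--                 value = line.split(":", 1)[1].strip()
--                 if value and path.startswith(value):
--                     return False
--     return True
-- ===== Notes on version B (the rewrite author's own statement) =====
-- stated objective: alternative
-- what changed: Replaces A's single pass with a boolean in_global_agent flag and a disallowed-prefixes accumulator by a two-stage parse: stage 1 groups the cleaned lines into user-agent-headed blocks (agent, body), stage 2 scans only the blocks whose agent is the global one for a Disallow value the path starts with.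
import Mathlib
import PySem

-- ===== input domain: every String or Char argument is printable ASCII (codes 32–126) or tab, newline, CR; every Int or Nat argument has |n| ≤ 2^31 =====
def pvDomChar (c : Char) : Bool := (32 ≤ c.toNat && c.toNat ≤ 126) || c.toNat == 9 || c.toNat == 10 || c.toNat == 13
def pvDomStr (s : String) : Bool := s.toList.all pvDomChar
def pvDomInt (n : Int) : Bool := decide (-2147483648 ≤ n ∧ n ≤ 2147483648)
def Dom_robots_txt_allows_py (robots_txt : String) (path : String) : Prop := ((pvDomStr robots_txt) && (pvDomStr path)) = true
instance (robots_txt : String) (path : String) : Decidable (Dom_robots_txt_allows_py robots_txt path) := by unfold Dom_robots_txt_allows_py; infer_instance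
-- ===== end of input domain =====

-- B restructures A into two stages: group lines into user-agent-headed blocks, then scan
-- only global-agent blocks for a matching Disallow (alternative decomposition, same cost).


-- ===== PORT A =====
-- `s.split(":", 1)[1]`: the branches guarantee a ":" is present, so index 1 exists;
-- the `.getD` defaults are unreachable there (Python would raise only if no ":" existed).
def pvTailAfterColon (s : String) : String :=
  ((PySem.Str.splitMax? s ":" 1).getD [])[1]?.getD ""

-- one iteration of A's for-loop over state (disallowed_prefixes, in_global_agent)
def pvAStep (st : List String × Bool) (line : String) : List String × Bool :=
  if line = "" || PySem.Str.startswith line "#" then st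
  else
    let lower := PySem.Str.lower line
    if PySem.Str.startswith lower "user-agent:" then
      let agent := PySem.Str.strip (pvTailAfterColon lower)
      (st.1, agent = "*" || agent = "\"*\"")
    else if st.2 && PySem.Str.startswith lower "disallow:" then
      let value := PySem.Str.strip (pvTailAfterColon line)
      if value ≠ "" then (st.1 ++ [value], st.2) else st
    else st

def robots_txt_allows_py (robots_txt : String) (path : String) : Bool :=
  let lines := (PySem.Str.splitlines robots_txt).map PySem.Str.strip
  let st := lines.foldl pvAStep ([], false)
  !(st.1.any (fun pfx => PySem.Str.startswith path pfx))

-- ===== PORT B =====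
-- Stage 1 of Source B: group cleaned lines into blocks headed by a user-agent line;
-- `cur` is the block currently open (none before any user-agent line).
def pvBlocks : List String → Option (String × List String) → List (String × List String)
  | [], cur => match cur with | none => [] | some b => [b]
  | raw :: rest, cur =>
    let line := PySem.Str.strip raw
    if line = "" || PySem.Str.startswith line "#" then pvBlocks rest cur
    else if PySem.Str.startswith (PySem.Str.lower line) "user-agent:" then
      let agent := PySem.Str.strip (pvTailAfterColon (PySem.Str.lower line))
      (match cur with | none => [] | some b => [b]) ++ pvBlocks rest (some (agent, []))
    else
      match cur with
      | none => pvBlocks rest none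
      | some (a, body) => pvBlocks rest (some (a, body ++ [line]))

-- Stage 2 of Source B: does this block's body deny `path`? (only global-agent blocks count)
def pvLineDeny (path line : String) : Bool :=
  PySem.Str.startswith (PySem.Str.lower line) "disallow:" &&
    (let value := PySem.Str.strip (pvTailAfterColon line)
     value ≠ "" && PySem.Str.startswith path value)

def pvBlockDeny (path : String) (b : String × List String) : Bool :=
  (b.1 = "*" || b.1 = "\"*\"") && b.2.any (pvLineDeny path)

def robots_txt_allows_py_alt (robots_txt : String) (path : String) : Bool :=
  !((pvBlocks (PySem.Str.splitlines robots_txt) none).any (pvBlockDeny path))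

-- ===== PRECONDITION & SPEC =====
def Spec_robots_txt_allows_py (robots_txt : String) (path : String) (out : Bool) : Prop := out = robots_txt_allows_py_alt robots_txt path
instance (robots_txt : String) (path : String) (out : Bool) : Decidable (Spec_robots_txt_allows_py robots_txt path out) := by unfold Spec_robots_txt_allows_py; infer_instance

-- ===== CLAIM (what is proved, stated in full; the proofs are below) =====
def Claim_equal_robots_txt_allows_py : Prop := ∀ (robots_txt : String) (path : String), Dom_robots_txt_allows_py robots_txt path → Spec_robots_txt_allows_py robots_txt path (robots_txt_allows_py robots_txt path)

-- ===== LEMMAS AND PROOFS =====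

-- globality of the agent of the currently open block = A's in_global_agent flag
def pvCurGlobal : Option (String × List String) → Bool
  | none => false
  | some b => b.1 = "*" || b.1 = "\"*\""

-- has the currently open block already collected a denying line?
def pvCurDeny (path : String) : Option (String × List String) → Bool
  | none => false
  | some b => pvBlockDeny path b

-- each step appends to A's accumulator (possibly nothing)
lemma pvAStep_fst (st : List String × Bool) (line : String) :
    ∃ t, (pvAStep st line).1 = st.1 ++ t := by
  simp only [pvAStep]
  split_ifs
  · exact ⟨[], by simp⟩
  · exact ⟨[], by simp⟩
  · exact ⟨[PySem.Str.strip (pvTailAfterColon line)], rfl⟩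
  · exact ⟨[], by simp⟩
  · exact ⟨[], by simp⟩

-- A's accumulator only grows: once a matching prefix is collected, the result is deny
lemma pvA_mono (path : String) : ∀ (lines : List String) (st : List String × Bool),
    st.1.any (fun p => PySem.Str.startswith path p) = true →
    (lines.foldl pvAStep st).1.any (fun p => PySem.Str.startswith path p) = true := by
  intro lines
  induction lines with
  | nil => intro st h; simpa using h
  | cons l rest ih =>
    intro st h
    simp only [List.foldl]
    apply ih
    obtain ⟨t, ht⟩ := pvAStep_fst st l
    rw [ht, List.any_append, h, Bool.true_or]

-- a block that already denies stays denying: it is emitted with a superset body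
lemma pvB_mono (path : String) : ∀ (lines : List String) (b : String × List String),
    pvBlockDeny path b = true →
    (pvBlocks lines (some b)).any (pvBlockDeny path) = true := by
  intro lines
  induction lines with
  | nil => intro b h; simp [pvBlocks, h]
  | cons raw rest ih =>
    intro b h
    obtain ⟨a, body⟩ := b
    simp only [pvBlocks]
    split_ifs with h1 h2
    · exact ih _ h
    · simp [h]
    · apply ih
      unfold pvBlockDeny at h ⊢
      simp only [List.any_append] at *
      simp_all

-- main invariant: A's fold from (acc, flag-of-cur) equals "acc clean ∧ blocks-from-cur clean"
lemma pv_main (path : String) : ∀ (lines : List String) (acc : List String)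
    (cur : Option (String × List String)), pvCurDeny path cur = false →
    (!(((lines.map PySem.Str.strip).foldl pvAStep (acc, pvCurGlobal cur)).1.any
        (fun p => PySem.Str.startswith path p)))
      = (!(acc.any (fun p => PySem.Str.startswith path p))
          && !((pvBlocks lines cur).any (pvBlockDeny path))) := by
  intro lines
  induction lines with
  | nil =>
    intro acc cur hcd
    cases cur with
    | none => simp [pvBlocks]
    | some b =>
      simp only [pvCurDeny] at hcd
      simp [pvBlocks, hcd]
  | cons raw rest ih =>
    intro acc cur hcd
    cases cur with
    | none =>
      simp only [List.map, List.foldl, pvBlocks, pvAStep, pvCurGlobal, Bool.false_and]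
      split_ifs with h1 h2 h3 h4
      · simpa [pvCurGlobal] using ih acc none hcd
      · have hnew := ih acc (some (PySem.Str.strip (pvTailAfterColon (PySem.Str.lower (PySem.Str.strip raw))), []))
          (by simp [pvCurDeny, pvBlockDeny])
        simp only [pvCurGlobal] at hnew
        rw [hnew]; simp
      · exact h3.elim
      · exact h3.elim
      · simpa [pvCurGlobal] using ih acc none hcd
    | some b =>
      obtain ⟨a, body⟩ := b
      simp only [pvCurDeny, pvBlockDeny] at hcd
      simp only [List.map, List.foldl, pvBlocks, pvAStep, pvCurGlobal]
      split_ifs with h1 h2 h3 h4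
      · -- blank or comment line: both sides skip
        simpa [pvCurGlobal] using ih acc (some (a, body)) (by simpa [pvCurDeny, pvBlockDeny] using hcd)
      · -- user-agent header: A toggles the flag, B emits the open block and opens a new one
        have hnew := ih acc (some (PySem.Str.strip (pvTailAfterColon (PySem.Str.lower (PySem.Str.strip raw))), []))
          (by simp [pvCurDeny, pvBlockDeny])
        simp only [pvCurGlobal] at hnew
        rw [hnew]
        simp [pvBlockDeny, hcd]
      · -- Disallow with a non-empty value inside a global block
        simp only [Bool.and_eq_true] at h3
        by_cases hm : PySem.Chars.startswith path.toList
            (PySem.Chars.strip (pvTailAfterColon (PySem.Str.strip raw)).toList) = true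
        · -- matching prefix: both sides deny
          have hA := pvA_mono path (rest.map PySem.Str.strip)
            (acc ++ [PySem.Str.strip (pvTailAfterColon (PySem.Str.strip raw))],
              (decide (a = "*") || decide (a = "\"*\"")))
            (by simp [List.any_append, PySem.Str.startswith, hm])
          have hB := pvB_mono path rest (a, body ++ [PySem.Str.strip raw])
            (by have h32 := h3.2
                simp at h32
                simp [pvBlockDeny, pvLineDeny, List.any_append, h3.1, h4, hm]
                exact Or.inr h32)
          rw [hA, hB]
          simp
        · -- non-matching prefix: A collects it harmlessly, B appends the line harmlessly
          have := ih (acc ++ [PySem.Str.strip (pvTailAfterColon (PySem.Str.strip raw))])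
            (some (a, body ++ [PySem.Str.strip raw]))
            (by simp only [pvCurDeny, pvBlockDeny, List.any_append] at hcd ⊢
                simp_all [pvLineDeny, PySem.Str.startswith])
          simp only [pvCurGlobal] at this
          rw [this]
          simp [List.any_append, PySem.Str.startswith, hm]
      · -- empty Disallow value: A skips, B appends a line that can never deny
        have := ih acc (some (a, body ++ [PySem.Str.strip raw]))
          (by simp only [pvCurDeny, pvBlockDeny, List.any_append] at hcd ⊢
              simp_all [pvLineDeny])
        simpa [pvCurGlobal] using this
      · -- any other line: A ignores it, B appends it to the open block (it can never deny)
        have := ih acc (some (a, body ++ [PySem.Str.strip raw]))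
          (by simp only [pvCurDeny, pvBlockDeny, List.any_append] at hcd ⊢
              simp only [Bool.and_eq_true, not_and, Bool.not_eq_true] at h3
              by_cases hg : (decide (a = "*") || decide (a = "\"*\"")) = true
              · simp_all [pvLineDeny]
              · simp_all)
        simpa [pvCurGlobal] using this

-- ===== VERDICT (by name: the statement is the Claim_ definition above) =====
theorem robots_txt_allows_py_spec : Claim_equal_robots_txt_allows_py := by
  intro robots_txt path _
  unfold Spec_robots_txt_allows_py robots_txt_allows_py robots_txt_allows_py_alt
  simpa using pv_main path (PySem.Str.splitlines robots_txt) [] none (by simp [pvCurDeny])
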